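-- pv_equiv track=rewrite | github.com/enya126/Python-2---software-design | cs313e/ConnectedRooms.py | solve
-- ===== SOURCE A (Python) =====
-- def solve(N, K, locks, keys):
--     # always need 1 key to unlock room 1
--     for i in range(1, N):
--         # key matches
--         if locks[i] == keys[i - 1]:
--             keys[i-1] = 0
--         # key don't match
--         else:
--             for j in range(0, i - 1):
--                 if locks[i] == keys[j]:
--                     keys[j] = 0
--     count = 0
--     for j in keys:
--         if j != 0:
--             count += 1
--     return count
-- ===== SOURCE B (Python) =====
-- def solve(N, K, locks, keys):
--     # Bucket-by-value rewrite: O(N + len(keys)) instead of A's O(N^2) nested scan.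
--     # Returns A's value; does not mutate `keys` (A zeroes entries of the caller's list in place).
--     n = len(keys)
--     buckets = {}
--     for idx in range(n - 1, -1, -1):  # descending, so each bucket list ends with its smallest index
--         buckets.setdefault(keys[idx], []).append(idx)
--     zeroed = [False] * n
--     for i in range(1, N):
--         v = locks[i]
--         cur = 0 if zeroed[i - 1] else keys[i - 1]
--         if cur == v:
--             zeroed[i - 1] = True
--         elif v != 0:
--             lst = buckets.get(v)
--             if lst:
--                 while lst and lst[-1] < i - 1:
--                     zeroed[lst.pop()] = True
--     return sum(1 for idx in range(n) if keys[idx] != 0 and not zeroed[idx])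
-- ===== Notes on version B (the rewrite author's own statement) =====
-- stated objective: faster
-- what changed: B replaces A's quadratic rescan of the key prefix (an inner loop over positions 0..i-2 for every lock) by a one-pass bucket index from key value to its pending positions (smallest last), popping each position at most once and tracking zeroed positions in a flag array; B also does not mutate the caller's keys list.
import Mathlib
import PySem

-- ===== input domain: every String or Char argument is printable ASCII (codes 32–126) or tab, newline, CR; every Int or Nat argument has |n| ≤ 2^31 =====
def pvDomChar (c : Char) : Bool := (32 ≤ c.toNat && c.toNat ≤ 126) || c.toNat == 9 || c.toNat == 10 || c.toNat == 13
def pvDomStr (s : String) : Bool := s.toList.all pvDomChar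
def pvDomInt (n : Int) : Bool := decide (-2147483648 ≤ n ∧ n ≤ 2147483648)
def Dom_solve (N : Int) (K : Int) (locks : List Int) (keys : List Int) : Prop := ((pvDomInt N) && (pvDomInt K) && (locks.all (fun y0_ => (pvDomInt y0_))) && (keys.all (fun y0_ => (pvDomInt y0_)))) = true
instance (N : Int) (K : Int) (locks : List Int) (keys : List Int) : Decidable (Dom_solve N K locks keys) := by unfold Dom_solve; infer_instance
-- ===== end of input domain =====

-- B replaces A's quadratic prefix rescans by one bucket index (value → pending key positions),
-- popping each position at most once.  Equivalence is about the RETURN value only: A zeroes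
-- entries of the caller's `keys` list in place, B does not mutate its arguments.

-- ===== PORT A =====
def stepA (locks : List Int) (ks : List Int) (i : Int) : List Int :=
  if PySem.List.pyGetD locks i 0 = PySem.List.pyGetD ks (i - 1) 0 then
    PySem.List.pySetD ks (i - 1) 0
  else
    (PySem.List.pyRange 0 (i - 1) 1).foldl
      (fun ks j =>
        if PySem.List.pyGetD locks i 0 = PySem.List.pyGetD ks j 0 then
          PySem.List.pySetD ks j 0
        else ks) ks

def solve (N : Int) (K : Int) (locks : List Int) (keys : List Int) : Int :=
  let ks := (PySem.List.pyRange 1 N 1).foldl (stepA locks) keys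
  ks.foldl (fun c x => if x ≠ 0 then c + 1 else c) 0

-- ===== PORT B =====
-- while lst and lst[-1] < bound: zeroed[lst.pop()] = True
def popLoop (bound : Int) (lst : List Int) (zeroed : List Bool) : List Int × List Bool :=
  if h : lst = [] then (lst, zeroed)
  else
    let j := PySem.List.pyGetD lst (-1) 0
    if j < bound then popLoop bound lst.dropLast (PySem.List.pySetD zeroed j true)
    else (lst, zeroed)
termination_by lst.length
decreasing_by simpa [List.length_dropLast] using Nat.sub_lt (List.length_pos_iff.mpr h) one_pos

def stepB (locks : List Int) (keys : List Int)
    (st : List Bool × PySem.Dict Int (List Int)) (i : Int) :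
    List Bool × PySem.Dict Int (List Int) :=
  let v := PySem.List.pyGetD locks i 0
  let cur := if PySem.List.pyGetD st.1 (i - 1) false then 0 else PySem.List.pyGetD keys (i - 1) 0
  if cur = v then (PySem.List.pySetD st.1 (i - 1) true, st.2)
  else if v ≠ 0 then
    -- lst = buckets.get(v); both None and [] are falsy, so the missing-key case is the empty list
    let lst := PySem.Dict.getD st.2 v []
    if lst.isEmpty then st
    else
      let p := popLoop (i - 1) lst st.1
      (p.2, st.2.insert v p.1)
  else st

def solve_alt (N : Int) (K : Int) (locks : List Int) (keys : List Int) : Int :=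
  let n : Int := PySem.List.len keys
  let buckets := (PySem.List.pyRange (n - 1) (-1) (-1)).foldl
      (fun (d : PySem.Dict Int (List Int)) idx =>
        d.modify (PySem.List.pyGetD keys idx 0) [] (· ++ [idx]))
      PySem.Dict.empty
  let st := (PySem.List.pyRange 1 N 1).foldl (stepB locks keys) (List.replicate n.toNat false, buckets)
  (PySem.List.pyRange 0 n 1).foldl
      (fun c idx =>
        if PySem.List.pyGetD keys idx 0 ≠ 0 ∧ ¬ PySem.List.pyGetD st.1 idx false then c + 1 else c) 0

-- ===== PRECONDITION & SPEC =====
-- Pre_ excludes exactly the inputs where Python A raises IndexError: for N ≥ 2 it reads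
-- locks[1..N-1] and keys[0..N-2].  (The two ports, being total with defaulted lookups,
-- happen to agree even outside these bounds, so the proof below does not need Pre_;
-- Pre_ is kept because outside it Python A raises rather than returning a value.)
def Pre_solve (N : Int) (K : Int) (locks : List Int) (keys : List Int) : Prop :=
  2 ≤ N → (N ≤ (locks.length : Int) ∧ N - 1 ≤ (keys.length : Int))
instance (N : Int) (K : Int) (locks : List Int) (keys : List Int) : Decidable (Pre_solve N K locks keys) := by unfold Pre_solve; infer_instance

def pvWitness_solve : Int × Int × List Int × List Int := (3, 0, [1, 2, 3], [2, 9])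

def Spec_solve (N : Int) (K : Int) (locks : List Int) (keys : List Int) (out : Int) : Prop := out = solve_alt N K locks keys
instance (N : Int) (K : Int) (locks : List Int) (keys : List Int) (out : Int) : Decidable (Spec_solve N K locks keys out) := by unfold Spec_solve; infer_instance

-- ===== CLAIM (what is proved, stated in full; the proofs are below) =====
def Claim_equal_solve : Prop := ∀ (N : Int) (K : Int) (locks : List Int) (keys : List Int), Dom_solve N K locks keys → Pre_solve N K locks keys → Spec_solve N K locks keys (solve N K locks keys)

-- ===== LEMMAS AND PROOFS =====

-- the initial bucket for value v: the key positions holding v, as B builds them (descending)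
def bkt (keys : List Int) (v : Int) : List Int :=
  (PySem.List.pyRange ((keys.length : Int) - 1) (-1) (-1)).filter
    (fun idx => PySem.List.pyGetD keys idx 0 == v)

theorem mem_bkt {keys : List Int} {v x : Int} :
    x ∈ bkt keys v ↔ (0 ≤ x ∧ x < (keys.length : Int) ∧ PySem.List.pyGetD keys x 0 = v) := by
  unfold bkt
  rw [List.mem_filter, PySem.List.pyRange_neg_one, List.mem_map]
  constructor
  · rintro ⟨⟨k, hk, rfl⟩, hp⟩
    simp only [List.mem_range] at hk
    refine ⟨by omega, by omega, by simpa using hp⟩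
  · rintro ⟨h0, h1, hp⟩
    refine ⟨⟨((keys.length : Int) - 1 - x).toNat, ?_, by omega⟩, by simpa using hp⟩
    simp only [List.mem_range]; omega

theorem bkt_sorted (keys : List Int) (v : Int) : (bkt keys v).Pairwise (· > ·) := by
  unfold bkt
  apply List.Pairwise.filter
  rw [PySem.List.pyRange_neg_one]
  refine List.pairwise_map.mpr ?_
  have : (List.range ((((keys.length : Int) - 1) - (-1)).toNat)).Pairwise (· < ·) :=
    List.pairwise_lt_range
  exact this.imp (by intro a b h; omega)

-- the coupling invariant between A's mutated key list and B's (zeroed, buckets) state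
def KInv (keys : List Int) (ks : List Int) (zeroed : List Bool)
    (buckets : PySem.Dict Int (List Int)) : Prop :=
  ks.length = keys.length ∧ zeroed.length = keys.length ∧
  (∀ j : Nat, ks.getD j 0 = if zeroed.getD j false then 0 else keys.getD j 0) ∧
  (∀ v : Int, ∃ k : Nat, buckets.getD v [] = (bkt keys v).take k ∧
      ∀ x ∈ (bkt keys v).drop k, zeroed.getD x.toNat false = true)

theorem getD_set' {α : Type} [Inhabited α] (xs : List α) (k m : Nat) (w d : α) :
    (xs.set k w).getD m d = if m = k ∧ k < xs.length then w else xs.getD m d := by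
  by_cases h : m = k ∧ k < xs.length
  · obtain ⟨rfl, hk⟩ := h
    simp [List.getD_eq_getElem?_getD, List.getElem?_set_self hk]
    exact fun h => absurd h (by omega)
  · rw [if_neg h]
    by_cases hm : m = k
    · subst hm
      have hk : ¬ m < xs.length := by tauto
      simp [List.getD_eq_getElem?_getD, hk]
    · simp [List.getD_eq_getElem?_getD, List.getElem?_set_ne (by omega : k ≠ m)]

theorem popLoop_append (bound y : Int) (ys : List Int) (z : List Bool) :
    popLoop bound (ys ++ [y]) z =
    if y < bound then popLoop bound ys (PySem.List.pySetD z y true) else (ys ++ [y], z) := by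
  rw [popLoop]
  simp [PySem.List.pyGetD_neg_one_append_singleton]

theorem takeWhile_append_last {p : Int → Bool} (ys : List Int) (y : Int) (h : p y = false) :
    (ys ++ [y]).takeWhile p = ys.takeWhile p := by
  induction ys with
  | nil => simp [List.takeWhile, h]
  | cons a t ih => simp only [List.cons_append, List.takeWhile_cons]; split <;> simp [ih]

theorem popLoop_spec (bound : Int) :
    ∀ (lst : List Int) (zeroed : List Bool), lst.Pairwise (· > ·) →
    (∀ x ∈ lst, 0 ≤ x ∧ x.toNat < zeroed.length) →
    (popLoop bound lst zeroed).1 = lst.takeWhile (fun x => !decide (x < bound)) ∧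
    (popLoop bound lst zeroed).2.length = zeroed.length ∧
    ∀ m : Nat, (popLoop bound lst zeroed).2.getD m false =
      (zeroed.getD m false || lst.any (fun x => decide (x < bound) && x == (m : Int))) := by
  intro lst
  induction lst using List.reverseRecOn with
  | nil => intro z _ _; rw [popLoop]; simp
  | append_singleton ys y ih =>
    intro z hp hb
    have hys : ys.Pairwise (· > ·) := (List.pairwise_append.mp hp).1
    have hgt : ∀ x ∈ ys, x > y := by
      intro x hx; exact (List.pairwise_append.mp hp).2.2 x hx y (by simp)
    have hy := hb y (by simp)
    rw [popLoop_append]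
    by_cases hlt : y < bound
    · simp only [if_pos hlt]
      have hset : PySem.List.pySetD z y true = z.set y.toNat true :=
        by exact PySem.List.pySetD_of_nonneg z true hy.1
      have hlen : (z.set y.toNat true).length = z.length := by simp
      have ihh := ih (PySem.List.pySetD z y true) hys
        (fun x hx => ⟨(hb x (by simp [hx])).1, by rw [hset, hlen]; exact (hb x (by simp [hx])).2⟩)
      refine ⟨?_, ?_, ?_⟩
      · rw [ihh.1, takeWhile_append_last]; simp [hlt]
      · rw [ihh.2.1, hset, hlen]
      · intro m
        rw [ihh.2.2 m, hset]
        have hgetD : (z.set y.toNat true).getD m false =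
            (z.getD m false || decide (m = y.toNat)) := by
          by_cases hm : m = y.toNat
          · subst hm; simp [List.getD_eq_getElem?_getD, List.getElem?_set_self (by exact hy.2)]
          · simp [List.getD_eq_getElem?_getD, List.getElem?_set_ne (by omega : y.toNat ≠ m), hm]
        rw [hgetD]
        have : (decide (m = y.toNat)) = (decide (y < bound) && y == (m : Int)) := by
          by_cases h : m = y.toNat
          · subst h; simp [hlt, Int.toNat_of_nonneg hy.1]
          · simp [hlt, h]; omega
        rw [List.any_append]
        simp only [List.any_cons, List.any_nil, Bool.or_false]
        rw [this]
        cases z.getD m false <;> cases ys.any (fun x => decide (x < bound) && x == (m:Int)) <;> simp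
    · simp only [if_neg hlt]
      refine ⟨?_, by simp, ?_⟩
      · symm; rw [List.takeWhile_eq_self_iff]
        intro x hx
        rcases List.mem_append.mp hx with h | h
        · have := hgt x h; simp; omega
        · simp at h; subst h; simp; omega
      · intro m
        have : ((ys ++ [y]).any fun x => decide (x < bound) && x == (m : Int)) = false := by
          rw [List.any_eq_false]
          intro x hx
          rcases List.mem_append.mp hx with h | h
          · have := hgt x h; simp; omega
          · simp at h; subst h; simp; omega
        rw [this]; simp

theorem innerA_spec (v : Int) :
    ∀ (t : Nat) (ks : List Int),
    ((PySem.List.pyRange 0 (t : Int) 1).foldl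
      (fun ks j => if v = PySem.List.pyGetD ks j 0 then PySem.List.pySetD ks j 0 else ks) ks).length = ks.length ∧
    ∀ m : Nat, ((PySem.List.pyRange 0 (t : Int) 1).foldl
      (fun ks j => if v = PySem.List.pyGetD ks j 0 then PySem.List.pySetD ks j 0 else ks) ks).getD m 0 =
      if (m : Int) < (t : Int) ∧ ks.getD m 0 = v then 0 else ks.getD m 0 := by
  intro t
  induction t with
  | zero =>
    intro ks
    rw [PySem.List.pyRange_one_eq_nil (by omega)]
    exact ⟨rfl, by intro m; simp⟩
  | succ t ih =>
    intro ks
    have hsplit : PySem.List.pyRange 0 ((t + 1 : Nat) : Int) 1 =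
        PySem.List.pyRange 0 (t : Int) 1 ++ [(t : Int)] := by
      push_cast
      exact PySem.List.pyRange_one_succ_right (by omega)
    rw [hsplit, List.foldl_append]
    obtain ⟨ihlen, ihget⟩ := ih ks
    set F := (PySem.List.pyRange 0 (t : Int) 1).foldl
      (fun ks j => if v = PySem.List.pyGetD ks j 0 then PySem.List.pySetD ks j 0 else ks) ks with hF
    simp only [List.foldl_cons, List.foldl_nil]
    have hFt : F.getD t 0 = ks.getD t 0 := by
      rw [ihget t, if_neg (by simp)]
    have hvt : PySem.List.pyGetD F (t : Int) 0 = F.getD t 0 := by simp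
    by_cases hc : v = F.getD t 0
    · rw [if_pos (by rw [hvt]; exact hc)]
      have hset : PySem.List.pySetD F (t : Int) 0 = F.set t 0 := by simp
      rw [hset]
      refine ⟨by simp [ihlen], ?_⟩
      intro m
      rw [getD_set' F t m 0 0, ihget m]
      by_cases hm : m = t
      · subst hm
        have hcond : (m : Int) < ((m + 1 : Nat) : Int) ∧ ks.getD m 0 = v := by
          refine ⟨by omega, by rw [hFt] at hc; omega⟩
        rw [if_pos hcond]
        by_cases hl : m < F.length
        · rw [if_pos ⟨rfl, hl⟩]
        · rw [if_neg (by tauto), if_neg ?_]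
          · exact List.getD_eq_default _ _ (by omega)
          · rw [hFt] at hc
            intro hx
            exact absurd hx.1 (by omega)
      · rw [if_neg (by tauto)]
        have hiff : ((m : Int) < (t : Int) ∧ ks.getD m 0 = v) ↔
            ((m : Int) < ((t + 1 : Nat) : Int) ∧ ks.getD m 0 = v) := by
          have hne : (m : Int) ≠ (t : Int) := by exact_mod_cast fun h => hm (by exact_mod_cast h)
          constructor
          · rintro ⟨h1, h2⟩; exact ⟨by push_cast; omega, h2⟩
          · rintro ⟨h1, h2⟩; push_cast at h1; exact ⟨by omega, h2⟩
        rw [if_congr hiff rfl rfl]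
    · rw [if_neg (by rw [hvt]; exact hc)]
      refine ⟨ihlen, ?_⟩
      intro m
      rw [ihget m]
      by_cases hm : m = t
      · subst hm
        rw [if_neg (by simp), if_neg ?_]
        rintro ⟨h1, h2⟩
        rw [hFt] at hc; omega
      · have hne : (m : Int) ≠ (t : Int) := by exact_mod_cast fun h => hm (by exact_mod_cast h)
        by_cases h1 : (m : Int) < (t : Int) ∧ ks.getD m 0 = v
        · rw [if_pos h1, if_pos ⟨by push_cast; omega, h1.2⟩]
        · rw [if_neg h1, if_neg ?_]
          rintro ⟨h2, h3⟩
          push_cast at h2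
          exact h1 ⟨by omega, h3⟩


theorem pyGetD_toNat {α : Type} (xs : List α) (i : Int) (d : α) (h : 0 ≤ i) :
    PySem.List.pyGetD xs i d = xs.getD i.toNat d := by
  have h2 := PySem.List.pyGetD_natCast (xs := xs) (n := i.toNat) (d := d)
  rw [Int.toNat_of_nonneg h] at h2
  exact h2

theorem desc_dropWhile_lt (bound : Int) :
    ∀ (lst : List Int), lst.Pairwise (· > ·) →
    ∀ x ∈ lst.dropWhile (fun x => !decide (x < bound)), x < bound := by
  intro lst
  induction lst with
  | nil => intro _ x hx; simp at hx
  | cons a tl ih =>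
    intro hp x hx
    rw [List.dropWhile_cons] at hx
    by_cases ha : a < bound
    · rw [if_neg (by simp [ha])] at hx
      rcases List.mem_cons.mp hx with rfl | hx2
      · exact ha
      · have := (List.pairwise_cons.mp hp).1 x hx2
        omega
    · rw [if_pos (by simp [ha])] at hx
      exact ih (List.pairwise_cons.mp hp).2 x hx

theorem step_pres (locks keys : List Int) (i : Int) (hi : 1 ≤ i)
    (ks : List Int) (zeroed : List Bool) (buckets : PySem.Dict Int (List Int))
    (h : KInv keys ks zeroed buckets) :
    KInv keys (stepA locks ks i) (stepB locks keys (zeroed, buckets) i).1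
      (stepB locks keys (zeroed, buckets) i).2 := by
  obtain ⟨hlen, hzlen, hpt, hbkt⟩ := h
  have hi1 : 0 ≤ i - 1 := by omega
  have hti : (((i - 1).toNat : Nat) : Int) = i - 1 := Int.toNat_of_nonneg hi1
  set v := PySem.List.pyGetD locks i 0 with hv
  set t := (i - 1).toNat with ht
  have hksA : PySem.List.pyGetD ks (i - 1) 0 = ks.getD t 0 := pyGetD_toNat ks (i-1) 0 hi1
  have hzB : PySem.List.pyGetD zeroed (i - 1) false = zeroed.getD t false := pyGetD_toNat zeroed (i-1) false hi1
  have hkB : PySem.List.pyGetD keys (i - 1) 0 = keys.getD t 0 := pyGetD_toNat keys (i-1) 0 hi1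
  have hcur : (if PySem.List.pyGetD zeroed (i-1) false then (0:Int) else PySem.List.pyGetD keys (i-1) 0)
      = PySem.List.pyGetD ks (i - 1) 0 := by
    rw [hksA, hzB, hkB]; exact (hpt t).symm
  -- a key position holding v ≠ 0 lies inside keys
  have hjlen : ∀ (j : Nat), v ≠ 0 → keys.getD j 0 = v → j < keys.length := by
    intro j hv0 hj
    by_contra hge
    rw [List.getD_eq_default _ _ (by omega)] at hj
    exact hv0 hj.symm
  have hmemb : ∀ (j : Nat), v ≠ 0 → keys.getD j 0 = v → ((j : Nat) : Int) ∈ bkt keys v := by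
    intro j hv0 hj
    refine mem_bkt.mpr ⟨by omega, by exact_mod_cast hjlen j hv0 hj, ?_⟩
    rw [PySem.List.pyGetD_natCast]
    exact hj
  simp only [stepA, stepB]
  by_cases hc : v = PySem.List.pyGetD ks (i - 1) 0
  · -- direct match: both zero position i-1
    rw [if_pos hc, if_pos (by rw [hcur]; exact hc.symm)]
    simp only []
    rw [PySem.List.pySetD_of_nonneg ks 0 hi1, PySem.List.pySetD_of_nonneg zeroed true hi1, ← ht]
    refine ⟨by simp [hlen], by simp [hzlen], ?_, ?_⟩
    · intro j
      rw [getD_set' ks t j 0 0, getD_set' zeroed t j true false]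
      by_cases hj : j = t ∧ t < ks.length
      · rw [if_pos (show j = t ∧ t < zeroed.length from ⟨hj.1, by omega⟩), if_pos hj]
        simp
      · rw [if_neg hj]
        rw [if_neg (show ¬(j = t ∧ t < zeroed.length) from fun hx => hj ⟨hx.1, by omega⟩)]
        exact hpt j
    · intro v'
      obtain ⟨k, hk1, hk2⟩ := hbkt v'
      refine ⟨k, hk1, fun x hx => ?_⟩
      rw [getD_set' zeroed t x.toNat true false]
      by_cases hxx : x.toNat = t ∧ t < zeroed.length
      · rw [if_pos hxx]
      · rw [if_neg hxx]; exact hk2 x hx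
  · -- no direct match: A rescans the prefix, B pops the bucket
    rw [if_neg hc, if_neg (by rw [hcur]; exact fun he => hc he.symm)]
    have hrange : PySem.List.pyRange 0 (i - 1) 1 = PySem.List.pyRange 0 ((t : Nat) : Int) 1 := by
      rw [hti]
    rw [hrange]
    obtain ⟨hFlen, hFget⟩ := innerA_spec v t ks
    by_cases hv0 : v = 0
    · -- v = 0: A only re-zeroes zeroes, B skips
      rw [if_neg (by simpa using hv0)]
      have hFj : ∀ j : Nat, (((PySem.List.pyRange 0 ((t : Nat) : Int) 1).foldl
          (fun ks j => if v = PySem.List.pyGetD ks j 0 then PySem.List.pySetD ks j 0 else ks) ks)).getD j 0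
          = ks.getD j 0 := by
        intro j
        rw [hFget j]
        split
        · next hcond => rw [hcond.2]; exact hv0.symm
        · rfl
      exact ⟨by rw [hFlen]; exact hlen, hzlen, fun j => by rw [hFj j]; exact hpt j, hbkt⟩
    · rw [if_pos (by simpa using hv0)]
      -- shared fact used by the empty-bucket branches: every position holding v is already zeroed
      have hempty_case : buckets.getD v [] = [] →
          KInv keys ((PySem.List.pyRange 0 ((t : Nat) : Int) 1).foldl
            (fun ks j => if v = PySem.List.pyGetD ks j 0 then PySem.List.pySetD ks j 0 else ks) ks)
            zeroed buckets := by
        intro hbv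
        obtain ⟨k, hk1, hk2⟩ := hbkt v
        rw [hbv] at hk1
        have hall : ∀ x ∈ bkt keys v, zeroed.getD x.toNat false = true := by
          intro x hx
          have : (bkt keys v).take k ++ (bkt keys v).drop k = bkt keys v := List.take_append_drop _ _
          rw [← hk1] at this
          simp only [List.nil_append] at this
          exact hk2 x (by rw [this]; exact hx)
        have hFj : ∀ j : Nat, (((PySem.List.pyRange 0 ((t : Nat) : Int) 1).foldl
            (fun ks j => if v = PySem.List.pyGetD ks j 0 then PySem.List.pySetD ks j 0 else ks) ks)).getD j 0
            = ks.getD j 0 := by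
          intro j
          rw [hFget j]
          split
          · next hcond =>
            exfalso
            have hksj := hpt j
            by_cases hzj : zeroed.getD j false
            · rw [if_pos hzj] at hksj
              rw [hksj] at hcond
              exact hv0 hcond.2.symm
            · rw [if_neg hzj] at hksj
              have hkj : keys.getD j 0 = v := by rw [← hksj]; exact hcond.2
              have hzz := hall _ (hmemb j hv0 hkj)
              rw [Int.toNat_natCast] at hzz
              exact hzj hzz
          · rfl
        exact ⟨by rw [hFlen]; exact hlen, hzlen, fun j => by rw [hFj j]; exact hpt j, hbkt⟩
      set lst := buckets.getD v [] with hbv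
      by_cases hemp : lst.isEmpty
      · rw [if_pos hemp]
        exact hempty_case (by rw [hbv]; exact List.isEmpty_iff.mp hemp)
      · rw [if_neg hemp]
        simp only []
        obtain ⟨k, hk1, hk2⟩ := hbkt v
        rw [← hbv] at hk1
        have hsort : lst.Pairwise (· > ·) := by
          rw [hk1]; exact (bkt_sorted keys v).sublist (List.take_sublist _ _)
        have hmem : ∀ x ∈ lst, 0 ≤ x ∧ x.toNat < zeroed.length := by
          intro x hx
          have hxb : x ∈ bkt keys v := by
            rw [hk1] at hx; exact List.mem_of_mem_take hx
          obtain ⟨h0, h1, _⟩ := mem_bkt.mp hxb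
          exact ⟨h0, by omega⟩
        obtain ⟨hP1, hPlen, hPget⟩ := popLoop_spec (i - 1) lst zeroed hsort hmem
        -- the new zeroed flags are exactly: old flag, or a fresh prefix match on value v
        have hZ : ∀ j : Nat, (popLoop (i - 1) lst zeroed).2.getD j false =
            (zeroed.getD j false || (decide ((j : Int) < i - 1) && (keys.getD j 0 == v))) := by
          intro j
          rw [hPget j]
          by_cases hzj : zeroed.getD j false = true
          · rw [hzj]; simp
          · rw [Bool.not_eq_true] at hzj
            rw [hzj]
            simp only [Bool.false_or]
            by_cases hcond : ((j : Int) < i - 1 ∧ keys.getD j 0 = v)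
            · have hjb := hmemb j hv0 hcond.2
              have hjlst : ((j : Nat) : Int) ∈ lst := by
                have : (bkt keys v).take k ++ (bkt keys v).drop k = bkt keys v := List.take_append_drop _ _
                rw [← this] at hjb
                rcases List.mem_append.mp hjb with hin | hin
                · rw [hk1]; exact hin
                · exfalso
                  have hzt := hk2 _ hin
                  rw [Int.toNat_natCast] at hzt
                  rw [hzj] at hzt
                  exact Bool.false_ne_true hzt
              have hany : lst.any (fun x => decide (x < i - 1) && x == ((j : Nat) : Int)) = true := by
                rw [List.any_eq_true]
                exact ⟨_, hjlst, by simp [hcond.1]⟩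
              rw [hany]
              symm
              simp only [Bool.and_eq_true, decide_eq_true_eq, beq_iff_eq]
              exact ⟨hcond.1, hcond.2⟩
            · have hany : lst.any (fun x => decide (x < i - 1) && x == ((j : Nat) : Int)) = false := by
                rw [List.any_eq_false]
                intro x hx
                simp only [Bool.and_eq_true, decide_eq_true_eq, beq_iff_eq, not_and]
                intro hxlt hxj
                have hxb : x ∈ bkt keys v := by rw [hk1] at hx; exact List.mem_of_mem_take hx
                obtain ⟨h0, h1, hkx⟩ := mem_bkt.mp hxb
                rw [hxj, PySem.List.pyGetD_natCast] at hkx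
                exact hcond ⟨by omega, hkx⟩
              rw [hany]
              by_cases hjl : (j : Int) < i - 1
              · have hkj : ¬ keys.getD j 0 = v := fun h => hcond ⟨hjl, h⟩
                have hb : (keys.getD j 0 == v) = false := by simp only [beq_eq_false_iff_ne]; exact hkj
                rw [hb, Bool.and_false]
              · have hb : decide ((j : Int) < i - 1) = false := by simp [hjl]
                rw [hb, Bool.false_and]
        refine ⟨by rw [hFlen]; exact hlen, by rw [hPlen]; exact hzlen, ?_, ?_⟩
        · intro j
          rw [hFget j, hZ j, hpt j]
          by_cases hzj : zeroed.getD j false = true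
          · rw [hzj]; simp
          · rw [Bool.not_eq_true] at hzj
            rw [hzj]
            by_cases hkj : keys.getD j 0 = v
            · by_cases hjl : (j : Int) < i - 1
              · simp [hti, hjl]
              · simp [hti, hjl]
            · simp [hti]
        · intro v'
          by_cases hv' : v' = v
          · rw [hv']
            rw [PySem.Dict.getD_insert_self]
            have hpre : (popLoop (i - 1) lst zeroed).1 <+: bkt keys v := by
              rw [hP1, hk1]
              exact (List.takeWhile_prefix _).trans (List.take_prefix _ _)
            refine ⟨(popLoop (i - 1) lst zeroed).1.length, (List.prefix_iff_eq_take.mp hpre), ?_⟩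
            intro x hx
            have hdecomp : bkt keys v =
                (lst.takeWhile (fun x => !decide (x < i - 1)) ++
                  (lst.dropWhile (fun x => !decide (x < i - 1)) ++ (bkt keys v).drop k)) := by
              rw [← List.append_assoc, List.takeWhile_append_dropWhile, hk1,
                List.take_append_drop]
            rw [hP1] at hx
            rw [hdecomp, List.drop_left] at hx
            rcases List.mem_append.mp hx with hin | hin
            · have hxlt : x < i - 1 := desc_dropWhile_lt (i - 1) lst hsort x hin
              have hxlst : x ∈ lst := (List.dropWhile_sublist _).subset hin
              rw [hPget x.toNat]
              have h0x : 0 ≤ x := (hmem x hxlst).1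
              have : lst.any (fun y => decide (y < i - 1) && y == ((x.toNat : Nat) : Int)) = true := by
                rw [List.any_eq_true]
                exact ⟨x, hxlst, by simp [hxlt, Int.toNat_of_nonneg h0x]⟩
              rw [this]; simp
            · rw [hPget x.toNat, hk2 x hin]; simp
          · rw [PySem.Dict.getD_insert_of_ne buckets _ _ hv']
            obtain ⟨k', hk1', hk2'⟩ := hbkt v'
            refine ⟨k', hk1', fun x hx => ?_⟩
            rw [hPget x.toNat, hk2' x hx]; simp

theorem fold_pres (locks keys : List Int) (l : List Int) (hl : ∀ i ∈ l, 1 ≤ i) :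
    ∀ (ks : List Int) (zeroed : List Bool) (buckets : PySem.Dict Int (List Int)),
    KInv keys ks zeroed buckets →
    KInv keys (l.foldl (stepA locks) ks)
      (l.foldl (stepB locks keys) (zeroed, buckets)).1
      (l.foldl (stepB locks keys) (zeroed, buckets)).2 := by
  revert hl
  induction l with
  | nil => intro hl ks zeroed buckets h; simpa using h
  | cons a tl ih =>
    intro hl ks zeroed buckets h
    simp only [List.foldl_cons]
    have h1 := step_pres locks keys a (hl a (by simp)) ks zeroed buckets h
    exact ih (fun i hi => hl i (by simp [hi])) _ _ _ h1

theorem init_inv (keys : List Int) :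
    KInv keys keys (List.replicate keys.length false)
      ((PySem.List.pyRange ((keys.length : Int) - 1) (-1) (-1)).foldl
        (fun (d : PySem.Dict Int (List Int)) idx =>
          d.modify (PySem.List.pyGetD keys idx 0) [] (· ++ [idx]))
        PySem.Dict.empty) := by
  refine ⟨rfl, by simp, ?_, ?_⟩
  · intro j
    have hrep : (List.replicate keys.length false).getD j false = false := by
      simp [List.getD_eq_getElem?_getD, List.getElem?_replicate]
      split <;> rfl
    rw [hrep]
    simp
  · intro v
    refine ⟨(bkt keys v).length, ?_, by simp⟩
    rw [List.take_length]
    rw [← List.foldl_map (f := fun idx => (PySem.List.pyGetD keys idx 0, idx))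
      (g := fun (d : PySem.Dict Int (List Int)) p => d.modify p.1 [] (· ++ [p.2]))]
    rw [PySem.Dict.getD_foldl_modify_append]
    rw [List.filter_map, List.map_map]
    simp only [PySem.Dict.getD_empty, List.nil_append]
    unfold bkt
    rw [show ((fun x => x.2) ∘ fun idx => (PySem.List.pyGetD keys idx 0, idx)) = id from rfl,
      List.map_id]
    rfl

theorem count_eq (keys ks : List Int) (zeroed : List Bool)
    (hlen : ks.length = keys.length)
    (hpt : ∀ j : Nat, ks.getD j 0 = if zeroed.getD j false then 0 else keys.getD j 0) :
    ks.foldl (fun c x => if x ≠ 0 then c + 1 else c) (0 : Int) =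
    (PySem.List.pyRange 0 (keys.length : Int) 1).foldl
      (fun c idx =>
        if PySem.List.pyGetD keys idx 0 ≠ 0 ∧ ¬ PySem.List.pyGetD zeroed idx false then c + 1 else c)
      (0 : Int) := by
  have hgen : ∀ (ks : List Int) (c : Int),
      ks.foldl (fun c x => if x ≠ 0 then c + 1 else c) c =
      (List.range ks.length).foldl (fun c j => if ks.getD j 0 ≠ 0 then c + 1 else c) c := by
    intro ks
    induction ks with
    | nil => intro c; simp
    | cons x t iht =>
      intro c
      simp only [List.foldl_cons, List.length_cons, List.range_succ_eq_map, List.foldl_map]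
      rw [iht]
      have hfun : (fun (x_1 : Int) (y : Nat) => if (x :: t).getD y.succ 0 ≠ 0 then x_1 + 1 else x_1)
          = (fun (c : Int) (j : Nat) => if t.getD j 0 ≠ 0 then c + 1 else c) := by
        funext c j
        simp [List.getD_eq_getElem?_getD]
      simp only [List.getD_cons_zero]
      rw [hfun]
  rw [hgen, PySem.List.pyRange_zero_nat, List.foldl_map]
  simp only [PySem.List.pyGetD_natCast]
  rw [hlen]
  have hfun2 : (fun (c : Int) (j : Nat) => if ks.getD j 0 ≠ 0 then c + 1 else c)
      = (fun (c : Int) (j : Nat) => if keys.getD j 0 ≠ 0 ∧ ¬ zeroed.getD j false then c + 1 else c) := by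
    funext c j
    rw [hpt j]
    by_cases hz : zeroed.getD j false = true
    · rw [hz]; simp
    · rw [Bool.not_eq_true] at hz
      rw [hz]; simp
  rw [hfun2]

-- ===== VERDICT (by name: the statement is the Claim_ definition above) =====
theorem solve_spec : Claim_equal_solve := by
  intro N K locks keys _ _
  unfold Spec_solve solve solve_alt
  have hinit := init_inv keys
  have hfold := fold_pres locks keys (PySem.List.pyRange 1 N 1)
    (fun i hi => (PySem.List.mem_pyRange_one.mp hi).1) keys
    (List.replicate keys.length false) _ hinit
  simp only [PySem.List.len_eq, Int.toNat_natCast] at *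
  exact count_eq keys _ _ hfold.1 hfold.2.2.1
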